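-- pv_equiv track=rewrite | github.com/yoo-chris/Python-programmers | Lv0/컨트롤 제트.py | solution
-- ===== SOURCE A (Python) =====
-- def solution(s):
--     answer = 0
--     n = []
--     s2 = s.split()
--     if s2[0] == 'Z':
--         s2[0] = '0'
--
--     for i in range(0,len(s2)):
--         if s2[i] == 'Z':
--             answer -= n.pop()
--         else:
--             n.append(int(s2[i]))
--             answer += int(s2[i])
--     return answer
-- ===== SOURCE B (Python) =====
-- def solution(s):
--     toks = s.split()
--     if toks and toks[0] == 'Z':
--         toks[0] = '0'
--     total = 0
--     skip = 0
--     for tok in reversed(toks):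
--         if tok == 'Z':
--             skip += 1
--         elif skip:
--             skip -= 1
--         else:
--             total += int(tok)
--     return total
-- ===== Notes on version B (the rewrite author's own statement) =====
-- stated objective: alternative
-- what changed: Replaced the forward pass that maintains a running total plus an explicit stack of pushed numbers (popped on 'Z') with a single backward scan keeping only a skip counter: each 'Z' increments skip, a number is dropped while skip>0 and added to the total otherwise, so the stack disappears entirely.
import Mathlib
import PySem

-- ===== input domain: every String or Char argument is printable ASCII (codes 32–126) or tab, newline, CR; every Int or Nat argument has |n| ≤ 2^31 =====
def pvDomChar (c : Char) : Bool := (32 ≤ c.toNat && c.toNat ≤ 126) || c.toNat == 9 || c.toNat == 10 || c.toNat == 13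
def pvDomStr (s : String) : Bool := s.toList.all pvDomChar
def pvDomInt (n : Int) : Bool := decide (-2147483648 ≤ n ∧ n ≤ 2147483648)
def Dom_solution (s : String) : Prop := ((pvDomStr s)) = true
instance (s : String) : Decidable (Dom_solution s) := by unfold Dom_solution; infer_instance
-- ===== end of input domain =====

-- B replaces A's forward pass (running total + explicit stack popped on 'Z') by a single
-- backward scan that keeps only a skip counter; equivalence is proved on Pre_ below.

-- used by A's port and by Pre_: s.split() with the leading-'Z' → '0' fixup
-- (an empty split, where A raises IndexError at s2[0], is represented as [] and excluded by Pre_)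
def pvFixTokens (s : String) : List String :=
  match PySem.Str.split₀ s with
  | [] => []
  | t :: r => (if t = "Z" then "0" else t) :: r

-- ===== PORT A =====
-- loop body of A; the state is none once Python has raised (n.pop() on empty, int() ValueError)
def solStepA (st : Option (Int × List Int)) (tok : String) : Option (Int × List Int) :=
  match st with
  | none => none
  | some (ans, n) =>
    if tok = "Z" then
      match n with
      | [] => none                       -- n.pop() raises IndexError
      | x :: xs => some (ans - x, xs)    -- answer -= n.pop()   (stack head = Python list end)
    else
      match PySem.Int.ofStr? tok with
      | none => none                     -- int() raises ValueError
      | some v => some (ans + v, v :: n) -- n.append(int(..)); answer += int(..)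

def solution (s : String) : Int :=
  let s2 := pvFixTokens s
  match s2.foldl solStepA (some (0, [])) with
  | some (ans, _) => ans
  | none => 0   -- Python raised here; such inputs are outside Pre_solution

-- ===== PORT B =====
-- B's for-loop over reversed(toks), as a tail recursion carrying (total, skip);
-- int(tok) is ported as (ofStr? tok).getD 0 — a token it rejects makes B's Python raise
-- ValueError, and all such inputs lie outside Pre_solution.
def solBLoop : List String → Int → Nat → Int
  | [], total, _ => total
  | tok :: rest, total, skip =>
    if tok = "Z" then solBLoop rest total (skip + 1)
    else if skip ≠ 0 then solBLoop rest total (skip - 1)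
    else solBLoop rest (total + (PySem.Int.ofStr? tok).getD 0) skip

def solution_alt (s : String) : Int :=
  match PySem.Str.split₀ s with
  | [] => 0                              -- no tokens: the loop runs zero times, total = 0
  | t :: rest => solBLoop ((if t = "Z" then "0" else t) :: rest).reverse 0 0

-- ===== PRECONDITION & SPEC =====
-- Pre_ excludes exactly the inputs where A raises: an empty split (IndexError at s2[0]),
-- a non-'Z' token int() rejects (ValueError), or a prefix with more 'Z's than numbers
-- (IndexError from n.pop() on an empty list).
def Pre_solution (s : String) : Prop :=
  pvFixTokens s ≠ [] ∧
  (∀ t ∈ pvFixTokens s, t ≠ "Z" → (PySem.Int.ofStr? t).isSome = true) ∧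
  (∀ k < (pvFixTokens s).length + 1,
      2 * ((pvFixTokens s).take k).count "Z" ≤ ((pvFixTokens s).take k).length)
instance (s : String) : Decidable (Pre_solution s) := by unfold Pre_solution; infer_instance

def pvWitness_solution : String := "1 2 Z 3"

def Spec_solution (s : String) (out : Int) : Prop := out = solution_alt s
instance (s : String) (out : Int) : Decidable (Spec_solution s out) := by unfold Spec_solution; infer_instance

-- ===== CLAIM (what is proved, stated in full; the proofs are below) =====
def Claim_equal_solution : Prop := ∀ (s : String), Dom_solution s → Pre_solution s → Spec_solution s (solution s)

-- ===== LEMMAS AND PROOFS =====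

-- abstract token: none = 'Z', some v = the parsed number
def pvParse (t : String) : Option Int := if t = "Z" then none else PySem.Int.ofStr? t

def pvStepA' : Option (Int × List Int) → Option Int → Option (Int × List Int)
  | none, _ => none
  | some (ans, n), none =>
    match n with
    | [] => none
    | x :: xs => some (ans - x, xs)
  | some (ans, n), some v => some (ans + v, v :: n)

def pvStepB' : Int × Nat → Option Int → Int × Nat
  | (t, k), none => (t, k + 1)
  | (t, k), some v => if k ≠ 0 then (t, k - 1) else (t + v, k)

-- the stack machine A runs (stack only)
def pvRun : List (Option Int) → List Int → Option (List Int)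
  | [], st => some st
  | none :: l, st =>
    match st with
    | [] => none
    | _ :: xs => pvRun l xs
  | some v :: l, st => pvRun l (v :: st)

theorem foldA_none (ts : List String) : ts.foldl solStepA none = none := by
  induction ts with
  | nil => rfl
  | cons t ts ih => simpa [solStepA] using ih

theorem foldA'_none (l : List (Option Int)) : l.foldl pvStepA' none = none := by
  induction l with
  | nil => rfl
  | cons a l ih => simpa [pvStepA'] using ih

theorem bridgeA (ts : List String) (ans : Int) (n : List Int)
    (h : ∀ t ∈ ts, t ≠ "Z" → (PySem.Int.ofStr? t).isSome = true) :
    ts.foldl solStepA (some (ans, n)) = (ts.map pvParse).foldl pvStepA' (some (ans, n)) := by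
  induction ts generalizing ans n with
  | nil => rfl
  | cons t ts ih =>
    by_cases hz : t = "Z"
    · subst hz
      cases n with
      | nil => simp [solStepA, pvParse, pvStepA', foldA_none, foldA'_none]
      | cons x xs =>
        simpa [solStepA, pvParse, pvStepA'] using ih _ _ (fun u hu => h u (List.mem_cons_of_mem _ hu))
    · obtain ⟨v, hv⟩ := Option.isSome_iff_exists.mp (h t (List.mem_cons_self) hz)
      simpa [solStepA, pvParse, pvStepA', hz, hv] using
        ih _ _ (fun u hu => h u (List.mem_cons_of_mem _ hu))

theorem bridgeB (ts : List String) (tot : Int) (k : Nat)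
    (h : ∀ t ∈ ts, t ≠ "Z" → (PySem.Int.ofStr? t).isSome = true) :
    solBLoop ts tot k = ((ts.map pvParse).foldl pvStepB' (tot, k)).1 := by
  induction ts generalizing tot k with
  | nil => rfl
  | cons t ts ih =>
    by_cases hz : t = "Z"
    · subst hz
      simpa [solBLoop, pvParse, pvStepB'] using ih _ _ (fun u hu => h u (List.mem_cons_of_mem _ hu))
    · obtain ⟨v, hv⟩ := Option.isSome_iff_exists.mp (h t (List.mem_cons_self) hz)
      by_cases hk : k = 0
      · subst hk
        simpa [solBLoop, pvParse, pvStepB', hz, hv] using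
          ih _ _ (fun u hu => h u (List.mem_cons_of_mem _ hu))
      · simpa [solBLoop, pvParse, pvStepB', hz, hv, hk] using
          ih _ _ (fun u hu => h u (List.mem_cons_of_mem _ hu))

theorem runA_eq (l : List (Option Int)) (ans : Int) (st : List Int) :
    l.foldl pvStepA' (some (ans, st)) =
      (pvRun l st).map (fun st' => (ans + st'.sum - st.sum, st')) := by
  induction l generalizing ans st with
  | nil => simp [pvRun]
  | cons a l ih =>
    cases a with
    | none =>
      cases st with
      | nil => simp [pvStepA', pvRun, foldA'_none]
      | cons x xs =>
        rw [List.foldl_cons]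
        show l.foldl pvStepA' (some (ans - x, xs)) = _
        rw [ih]
        cases h : pvRun l xs <;> simp [pvRun, h] <;> ring
    | some v =>
      rw [List.foldl_cons]
      show l.foldl pvStepA' (some (ans + v, v :: st)) = _
      rw [ih]
      cases h : pvRun l (v :: st) <;> simp [pvRun, h] <;> ring

theorem shiftB (l : List (Option Int)) (t : Int) (k : Nat) :
    (l.foldl pvStepB' (t, k)).1 = t + (l.foldl pvStepB' (0, k)).1 := by
  induction l generalizing t k with
  | nil => simp
  | cons a l ih =>
    cases a with
    | none =>
      rw [List.foldl_cons, List.foldl_cons]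
      simp only [pvStepB']
      exact ih t (k + 1)
    | some v =>
      rw [List.foldl_cons, List.foldl_cons]
      simp only [pvStepB']
      split_ifs with hk
      · exact ih t (k - 1)
      · rw [ih (t + v) k, ih (0 + v) k]
        ring

theorem run_append (l : List (Option Int)) (a : Option Int) (st : List Int) :
    pvRun (l ++ [a]) st = (pvRun l st).bind (fun st' =>
      match a with
      | none => (match st' with | [] => none | _ :: xs => some xs)
      | some v => some (v :: st')) := by
  induction l generalizing st with
  | nil => cases a <;> simp [pvRun]
  | cons b l ih =>
    cases b with
    | none =>
      cases st with
      | nil => simp [pvRun]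
      | cons x xs => simpa [pvRun] using ih xs
    | some v => simpa [pvRun] using ih (v :: st)

theorem mainB (l : List (Option Int)) :
    ∀ (st : List Int) (k : Nat), pvRun l [] = some st →
      (l.reverse.foldl pvStepB' (0, k)).1 = (st.drop k).sum := by
  induction l using List.reverseRecOn with
  | nil => intro st k h; simp [pvRun] at h; subst h; simp
  | append_singleton l a ih =>
    intro st k h
    rw [run_append] at h
    cases h1 : pvRun l [] with
    | none => rw [h1] at h; simp at h
    | some st1 =>
      rw [h1] at h
      cases a with
      | none =>
        cases st1 with
        | nil => simp at h
        | cons x xs =>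
          simp at h; subst h
          rw [List.reverse_append]
          simp only [List.reverse_cons, List.reverse_nil, List.nil_append, List.singleton_append,
            List.foldl_cons]
          simp only [pvStepB']
          rw [ih (x :: xs) (k + 1) h1]
          simp
      | some v =>
        simp at h; subst h
        rw [List.reverse_append]
        simp only [List.reverse_cons, List.reverse_nil, List.nil_append, List.singleton_append,
          List.foldl_cons]
        simp only [pvStepB']
        cases k with
        | zero =>
          rw [if_neg (by simp)]
          rw [shiftB, ih st1 0 h1]
          simp
        | succ k' =>
          rw [if_pos (by simp)]
          simp only [Nat.add_sub_cancel]
          rw [ih st1 k' h1]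
          simp

theorem countNS (l : List (Option Int)) :
    l.countP (fun o => o.isNone) + l.countP (fun o => o.isSome) = l.length := by
  induction l with
  | nil => rfl
  | cons a l ih => cases a <;> simp [List.countP_cons] <;> omega

theorem run_some (l : List (Option Int)) :
    ∀ (st : List Int),
      (∀ k < l.length + 1,
        (l.take k).countP (fun o => o.isNone) ≤ (l.take k).countP (fun o => o.isSome) + st.length) →
      (pvRun l st).isSome = true := by
  induction l with
  | nil => intro st _; simp [pvRun]
  | cons a l ih =>
    intro st h
    cases a with
    | none =>
      cases st with
      | nil =>
        have := h 1 (by simp)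
        simp [List.take_succ_cons, List.countP_cons] at this
      | cons x xs =>
        show (pvRun l xs).isSome = true
        apply ih
        intro k hk
        have := h (k + 1) (by simp; omega)
        simp only [List.take_succ_cons, List.countP_cons, Option.isNone_none, Option.isSome_none,
          List.length_cons, if_true, if_false] at this
        simp at this
        omega
    | some v =>
      show (pvRun l (v :: st)).isSome = true
      apply ih
      intro k hk
      have := h (k + 1) (by simp; omega)
      simp only [List.take_succ_cons, List.countP_cons, Option.isNone_some, Option.isSome_some,
        List.length_cons, if_true, if_false] at this
      simp at this
      simp only [List.length_cons]
      omega

-- under Pre_, a token maps to none exactly when it is "Z"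
theorem parse_none_iff (t : String) (h : t ≠ "Z" → (PySem.Int.ofStr? t).isSome = true) :
    ((pvParse t).isNone = true) ↔ t = "Z" := by
  by_cases hz : t = "Z"
  · simp [pvParse, hz]
  · have hs := h hz
    simp only [pvParse, if_neg hz]
    constructor
    · intro he
      rw [Option.isNone_iff_eq_none] at he
      rw [he] at hs
      simp at hs
    · intro he
      exact absurd he hz

-- B's port on a nonempty split computes solBLoop over the fixed token list, reversed
theorem solution_alt_eq (s : String) (h : pvFixTokens s ≠ []) :
    solution_alt s = solBLoop (pvFixTokens s).reverse 0 0 := by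
  unfold solution_alt pvFixTokens at *
  cases hs : PySem.Str.split₀ s with
  | nil => rw [hs] at h; simp at h
  | cons t r => simp [hs]

theorem solution_spec : Claim_equal_solution := by
  intro s _ hpre
  obtain ⟨hne, hparse, hbal⟩ := hpre
  unfold Spec_solution solution
  rw [solution_alt_eq s hne]
  set ts := pvFixTokens s with hts
  set l := ts.map pvParse with hl
  -- translate the balance condition to the abstract list
  have hcnt : ∀ k < l.length + 1,
      (l.take k).countP (fun o => o.isNone) ≤ (l.take k).countP (fun o => o.isSome) + ([] : List Int).length := by
    intro k hk
    have hlen : l.length = ts.length := by simp [hl]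
    have htake : l.take k = (ts.take k).map pvParse := by simp [hl, List.map_take]
    have hN : (l.take k).countP (fun o => o.isNone) = (ts.take k).count "Z" := by
      rw [htake, List.countP_map, List.count_eq_countP]
      apply List.countP_congr
      intro t htmem
      have hmem : t ∈ ts := List.mem_of_mem_take htmem
      have := parse_none_iff t (hparse t hmem)
      simp only [Function.comp]
      by_cases hz : t = "Z" <;> simp [hz] at this ⊢ <;> simp_all
    have hS : (l.take k).countP (fun o => o.isNone) + (l.take k).countP (fun o => o.isSome) = (ts.take k).length := by
      rw [countNS, htake]; simp
    have hb := hbal k (by omega)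
    simp only [List.length_nil]
    omega
  obtain ⟨st, hst⟩ := Option.isSome_iff_exists.mp (run_some l [] hcnt)
  -- A's side
  have hA : ts.foldl solStepA (some (0, [])) = some (st.sum, st) := by
    rw [bridgeA ts 0 [] hparse, ← hl, runA_eq, hst]
    simp
  -- B's side
  have hparse' : ∀ t ∈ ts.reverse, t ≠ "Z" → (PySem.Int.ofStr? t).isSome = true := by
    intro t htm; exact hparse t (List.mem_reverse.mp htm)
  have hB : solBLoop ts.reverse 0 0 = (l.reverse.foldl pvStepB' (0, 0)).1 := by
    rw [bridgeB ts.reverse 0 0 hparse']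
    simp [hl]
  simp only [hA, hB]
  have := mainB l st 0 hst
  simp at this
  simp [this]
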